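-- pv_equiv track=rewrite | github.com/hongyiheng/lc-base-on-doocs | Array/2094.Finding 3-Digit Even Numbers/Solution.py | findEvenNumbers
-- ===== SOURCE A (Python) =====
-- from typing import List
--
-- def findEvenNumbers(digits: List[int]) -> List[int]:
--     s = set()
--     n = len(digits)
--     for i in range(n):
--         if digits[i] == 0:
--             continue
--         for j in range(n):
--             if j == i:
--                 continue
--             for k in range(n):
--                 if k == j or k == i or digits[k] % 2:
--                     continue
--                 s.add(digits[i] * 100 + digits[j] * 10 + digits[k])
--     return sorted(list(s))
-- ===== SOURCE B (Python) =====
-- from typing import List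
--
-- def findEvenNumbers(digits: List[int]) -> List[int]:
--     cnt = {}
--     for d in digits:
--         cnt[d] = cnt.get(d, 0) + 1
--     vals = list(cnt)
--     res = set()
--     for a in vals:
--         if a == 0:
--             continue
--         for b in vals:
--             for c in vals:
--                 if c % 2:
--                     continue
--                 t = [a, b, c]
--                 if all(cnt.get(v, 0) >= t.count(v) for v in t):
--                     res.add(a * 100 + b * 10 + c)
--     return sorted(res)
-- ===== Notes on version B (the rewrite author's own statement) =====
-- stated objective: alternative
-- what changed: A enumerates all O(n^3) index triples and inserts each candidate into a set; B builds a digit-frequency dictionary once and enumerates triples of DISTINCT digit values (O(n + m^3) for m distinct values), admitting a value triple iff its multiset fits under the frequency counts.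
import Mathlib
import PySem

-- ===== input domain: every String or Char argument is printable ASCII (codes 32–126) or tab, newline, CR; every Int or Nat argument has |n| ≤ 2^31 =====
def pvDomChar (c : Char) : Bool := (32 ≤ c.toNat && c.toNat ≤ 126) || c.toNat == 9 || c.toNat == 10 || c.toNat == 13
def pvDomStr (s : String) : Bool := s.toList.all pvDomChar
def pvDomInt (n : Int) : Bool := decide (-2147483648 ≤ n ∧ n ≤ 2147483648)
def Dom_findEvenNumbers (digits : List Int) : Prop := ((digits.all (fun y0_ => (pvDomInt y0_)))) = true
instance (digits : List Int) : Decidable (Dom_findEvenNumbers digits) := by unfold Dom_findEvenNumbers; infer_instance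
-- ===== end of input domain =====

-- B replaces A's triple loop over index triples by a frequency dictionary and a triple loop
-- over the DISTINCT digit values with a multiset-feasibility test (objective: alternative).

-- ===== PORT A =====
-- A's set s, built by the triple loop over indices; digits[i] on an in-range index is exact as pyGetD.
def pvSetA (digits : List Int) : PySem.Set Int :=
  (PySem.List.pyRange 0 (digits.length : Int)).foldl (fun s i =>
    if PySem.List.pyGetD digits i 0 = 0 then s
    else (PySem.List.pyRange 0 (digits.length : Int)).foldl (fun s j =>
      if j = i then s
      else (PySem.List.pyRange 0 (digits.length : Int)).foldl (fun s k =>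
        if k = j ∨ k = i ∨ PySem.Int.mod (PySem.List.pyGetD digits k 0) 2 ≠ 0 then s
        else PySem.Set.add s (PySem.List.pyGetD digits i 0 * 100 +
              PySem.List.pyGetD digits j 0 * 10 + PySem.List.pyGetD digits k 0)) s) s)
    PySem.Set.empty


def findEvenNumbers (digits : List Int) : List Int :=
  PySem.List.sorted (pvSetA digits) (fun x => x) false

-- ===== PORT B =====
-- the frequency dict built by `cnt[d] = cnt.get(d, 0) + 1`
def pvCnt (digits : List Int) : PySem.Dict Int Int :=
  digits.foldl (fun d x => d.insert x (d.getD x 0 + 1)) PySem.Dict.empty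

-- B's set res, built by the triple loop over the distinct values `vals = list(cnt)`
def pvSetB (digits : List Int) : PySem.Set Int :=
  let cnt := pvCnt digits
  let vals := cnt.keys
  vals.foldl (fun s a =>
    if a = 0 then s
    else vals.foldl (fun s b =>
      vals.foldl (fun s c =>
        if PySem.Int.mod c 2 ≠ 0 then s
        else
          if ([a, b, c].all fun v => decide ((([a, b, c].count v : Int)) ≤ cnt.getD v 0)) then
            PySem.Set.add s (a * 100 + b * 10 + c)
          else s) s) s)
    PySem.Set.empty


def findEvenNumbers_alt (digits : List Int) : List Int :=
  PySem.List.sorted (pvSetB digits) (fun x => x) false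

-- ===== PRECONDITION & SPEC =====
def Spec_findEvenNumbers (digits : List Int) (out : List Int) : Prop := out = findEvenNumbers_alt digits
instance (digits : List Int) (out : List Int) : Decidable (Spec_findEvenNumbers digits out) := by unfold Spec_findEvenNumbers; infer_instance

-- ===== CLAIM (what is proved, stated in full; the proofs are below) =====
def Claim_equal_findEvenNumbers : Prop := ∀ (digits : List Int), Dom_findEvenNumbers digits → Spec_findEvenNumbers digits (findEvenNumbers digits)

-- ===== LEMMAS AND PROOFS =====

-- membership in a set-accumulating foldl, given a characterisation of one step
theorem pv_mem_foldl {α : Type} (F : PySem.Set Int → α → PySem.Set Int)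
    (P : α → Int → Prop) (h : ∀ s e x, x ∈ F s e ↔ x ∈ s ∨ P e x)
    (l : List α) (s0 : PySem.Set Int) (x : Int) :
    x ∈ l.foldl F s0 ↔ x ∈ s0 ∨ ∃ e ∈ l, P e x := by
  induction l generalizing s0 with
  | nil => simp
  | cons y ys ih =>
    rw [List.foldl_cons, ih (F s0 y)]
    simp only [h, List.mem_cons]
    constructor
    · rintro ((hx | hp) | ⟨e, he, hp⟩)
      · exact Or.inl hx
      · exact Or.inr ⟨y, Or.inl rfl, hp⟩
      · exact Or.inr ⟨e, Or.inr he, hp⟩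
    · rintro (hx | ⟨e, (rfl | he), hp⟩)
      · exact Or.inl (Or.inl hx)
      · exact Or.inl (Or.inr hp)
      · exact Or.inr ⟨e, he, hp⟩

-- a foldl whose step preserves Nodup preserves Nodup
theorem pv_nodup_foldl {α : Type} (F : PySem.Set Int → α → PySem.Set Int)
    (h : ∀ s e, List.Nodup s → List.Nodup (F s e))
    (l : List α) (s0 : PySem.Set Int) (h0 : List.Nodup s0) :
    List.Nodup (l.foldl F s0) := by
  induction l generalizing s0 with
  | nil => exact h0
  | cons y ys ih => exact ih (F s0 y) (h s0 y h0)

theorem pv_one_le_count {d : List Int} {v : Int} :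
    1 ≤ List.count v d ↔ ∃ i : Nat, d[i]? = some v := by
  rw [List.one_le_count_iff, List.mem_iff_getElem?]


theorem pv_two_le_count {d : List Int} {v : Int} :
    2 ≤ List.count v d ↔ ∃ i j : Nat, i ≠ j ∧ d[i]? = some v ∧ d[j]? = some v := by
  constructor
  · intro h
    rw [← List.replicate_sublist_iff] at h
    obtain ⟨is, heq, hpw⟩ := List.sublist_eq_map_getElem h
    rcases is with _ | ⟨p, _ | ⟨q, _ | ⟨r, t⟩⟩⟩
    · simp [List.replicate] at heq
    · simp [List.replicate] at heq
    case _ =>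
      simp only [List.map_cons, List.map_nil, List.replicate, List.cons.injEq] at heq
      have hpq : p < q := by
        simp only [List.pairwise_cons] at hpw
        exact hpw.1 q (by simp)
      refine ⟨p.1, q.1, by omega, ?_, ?_⟩
      · exact List.getElem?_eq_some_iff.mpr ⟨p.isLt, heq.1.symm⟩
      · exact List.getElem?_eq_some_iff.mpr ⟨q.isLt, heq.2.1.symm⟩
    case _ => exact absurd (congrArg List.length heq) (by simp [List.replicate])
  · rintro ⟨i, j, hij, hi, hj⟩
    obtain ⟨hi', hvi⟩ := List.getElem?_eq_some_iff.mp hi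
    obtain ⟨hj', hvj⟩ := List.getElem?_eq_some_iff.mp hj
    have key : ∀ p q : Nat, (hp : p < d.length) → (hq : q < d.length) → p < q →
        d[p] = v → d[q] = v → 2 ≤ List.count v d := by
      intro p q hp hq hlt hdp hdq
      have hs : (List.replicate 2 v).Sublist d := by
        have := List.map_getElem_sublist (l := d) (is := [⟨p, hp⟩, ⟨q, hq⟩])
          (by simp [List.pairwise_cons]; exact hlt)
        simpa [List.replicate, hdp, hdq] using this
      exact List.replicate_sublist_iff.mp hs
    rcases Nat.lt_or_ge i j with h | h
    · exact key i j hi' hj' h hvi hvj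
    · exact key j i hj' hi' (by omega) hvj hvi

theorem pv_three_le_count {d : List Int} {v : Int} :
    3 ≤ List.count v d ↔ ∃ i j k : Nat, i ≠ j ∧ i ≠ k ∧ j ≠ k ∧
      d[i]? = some v ∧ d[j]? = some v ∧ d[k]? = some v := by
  constructor
  · intro h
    rw [← List.replicate_sublist_iff] at h
    obtain ⟨is, heq, hpw⟩ := List.sublist_eq_map_getElem h
    rcases is with _ | ⟨p, _ | ⟨q, _ | ⟨r, _ | ⟨w, t⟩⟩⟩⟩
    · simp [List.replicate] at heq
    · simp [List.replicate] at heq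
    · simp [List.replicate] at heq
    case _ =>
      simp only [List.map_cons, List.map_nil, List.replicate, List.cons.injEq] at heq
      simp only [List.pairwise_cons, List.mem_cons, List.not_mem_nil] at hpw
      have hpq : p < q := hpw.1 q (Or.inl rfl)
      have hqr : q < r := hpw.2.1 r (Or.inl rfl)
      refine ⟨p.1, q.1, r.1, by omega, by omega, by omega, ?_, ?_, ?_⟩
      · exact List.getElem?_eq_some_iff.mpr ⟨p.isLt, heq.1.symm⟩
      · exact List.getElem?_eq_some_iff.mpr ⟨q.isLt, heq.2.1.symm⟩
      · exact List.getElem?_eq_some_iff.mpr ⟨r.isLt, heq.2.2.1.symm⟩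
    case _ => exact absurd (congrArg List.length heq) (by simp [List.replicate])
  · rintro ⟨i, j, k, hij, hik, hjk, hi, hj, hk⟩
    obtain ⟨hi', hvi⟩ := List.getElem?_eq_some_iff.mp hi
    obtain ⟨hj', hvj⟩ := List.getElem?_eq_some_iff.mp hj
    obtain ⟨hk', hvk⟩ := List.getElem?_eq_some_iff.mp hk
    have key : ∀ p q r : Nat, (hp : p < d.length) → (hq : q < d.length) → (hr : r < d.length) →
        p < q → q < r → d[p] = v → d[q] = v → d[r] = v → 3 ≤ List.count v d := by
      intro p q r hp hq hr h1 h2 hdp hdq hdr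
      have hs : (List.replicate 3 v).Sublist d := by
        have := List.map_getElem_sublist (l := d) (is := [⟨p, hp⟩, ⟨q, hq⟩, ⟨r, hr⟩])
          (by simp [List.pairwise_cons]; omega)
        simpa [List.replicate, hdp, hdq, hdr] using this
      exact List.replicate_sublist_iff.mp hs
    rcases Nat.lt_trichotomy i j with h1 | h1 | h1 <;>
      [skip; exact absurd h1 hij; skip] <;>
      rcases Nat.lt_trichotomy i k with h2 | h2 | h2 <;>
      [skip; (exact absurd h2 hik); skip; skip; (exact absurd h2 hik); skip] <;>
      rcases Nat.lt_trichotomy j k with h3 | h3 | h3 <;>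
        first
        | exact absurd h3 hjk
        | exact key i j k hi' hj' hk' h1 h3 hvi hvj hvk
        | exact key i k j hi' hk' hj' h2 (by omega) hvi hvk hvj
        | exact key k i j hk' hi' hj' (by omega) h1 hvk hvi hvj
        | exact key j i k hj' hi' hk' (by omega) h2 hvj hvi hvk
        | exact key j k i hj' hk' hi' h3 (by omega) hvj hvk hvi
        | exact key k j i hk' hj' hi' (by omega) (by omega) hvk hvj hvi

def PvTriple (d : List Int) (a b c : Int) : Prop :=
  ∃ i j k : Nat, i ≠ j ∧ i ≠ k ∧ j ≠ k ∧ d[i]? = some a ∧ d[j]? = some b ∧ d[k]? = some c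

theorem pv_ne_of_get {d : List Int} {i j : Nat} {x y : Int}
    (hx : d[i]? = some x) (hy : d[j]? = some y) (hxy : x ≠ y) : i ≠ j := by
  intro h
  rw [h] at hx
  rw [hx] at hy
  exact hxy (Option.some.inj hy)

theorem pv_triple_iff (d : List Int) (a b c : Int) :
    PvTriple d a b c ↔
      (List.count a [a,b,c] ≤ List.count a d ∧ List.count b [a,b,c] ≤ List.count b d ∧
       List.count c [a,b,c] ≤ List.count c d) := by
  constructor
  · rintro ⟨i, j, k, hij, hik, hjk, hi, hj, hk⟩
    have hv : ∀ v : Int, List.count v [a,b,c] ≤ List.count v d := by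
      intro v
      by_cases hav : a = v <;> by_cases hbv : b = v <;> by_cases hcv : c = v
      · have h1 : List.count v [a,b,c] = 3 := by simp [hav, hbv, hcv]
        have h2 := pv_three_le_count.mpr ⟨i, j, k, hij, hik, hjk,
          (show d[i]? = some v by rw [← hav]; exact hi),
          (show d[j]? = some v by rw [← hbv]; exact hj),
          (show d[k]? = some v by rw [← hcv]; exact hk)⟩
        omega
      · have h1 : List.count v [a,b,c] = 2 := by simp [hav, hbv, hcv]
        have h2 := pv_two_le_count.mpr ⟨i, j, hij,
          (show d[i]? = some v by rw [← hav]; exact hi),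
          (show d[j]? = some v by rw [← hbv]; exact hj)⟩
        omega
      · have h1 : List.count v [a,b,c] = 2 := by simp [hav, hbv, hcv]
        have h2 := pv_two_le_count.mpr ⟨i, k, hik,
          (show d[i]? = some v by rw [← hav]; exact hi),
          (show d[k]? = some v by rw [← hcv]; exact hk)⟩
        omega
      · have h1 : List.count v [a,b,c] = 1 := by simp [hav, hbv, hcv]
        have h2 := pv_one_le_count.mpr ⟨i, (show d[i]? = some v by rw [← hav]; exact hi)⟩
        omega
      · have h1 : List.count v [a,b,c] = 2 := by simp [hav, hbv, hcv]
        have h2 := pv_two_le_count.mpr ⟨j, k, hjk,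
          (show d[j]? = some v by rw [← hbv]; exact hj),
          (show d[k]? = some v by rw [← hcv]; exact hk)⟩
        omega
      · have h1 : List.count v [a,b,c] = 1 := by simp [hav, hbv, hcv]
        have h2 := pv_one_le_count.mpr ⟨j, (show d[j]? = some v by rw [← hbv]; exact hj)⟩
        omega
      · have h1 : List.count v [a,b,c] = 1 := by simp [hav, hbv, hcv]
        have h2 := pv_one_le_count.mpr ⟨k, (show d[k]? = some v by rw [← hcv]; exact hk)⟩
        omega
      · have h1 : List.count v [a,b,c] = 0 := by simp [hav, hbv, hcv]
        omega
    exact ⟨hv a, hv b, hv c⟩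
  · rintro ⟨h1, h2, h3⟩
    by_cases hab : a = b <;> by_cases hac : a = c
    · -- a = b = c
      have hca : List.count a [a,b,c] = 3 := by simp [← hab, ← hac]
      obtain ⟨i, j, k, hij, hik, hjk, hi, hj, hk⟩ :=
        pv_three_le_count.mp (by omega : 3 ≤ List.count a d)
      exact ⟨i, j, k, hij, hik, hjk, hi, (show d[j]? = some b by rw [← hab]; exact hj),
        (show d[k]? = some c by rw [← hac]; exact hk)⟩
    · -- a = b ≠ c
      have hca : List.count a [a,b,c] = 2 := by simp [← hab, hac]
      have hcc : 1 ≤ List.count c [a,b,c] := by simp [← hab, hac]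
      obtain ⟨i, j, hij, hi, hj⟩ := pv_two_le_count.mp (by omega : 2 ≤ List.count a d)
      obtain ⟨k, hk⟩ := pv_one_le_count.mp (by omega : 1 ≤ List.count c d)
      exact ⟨i, j, k, hij, pv_ne_of_get hi hk hac, pv_ne_of_get hj hk hac, hi,
        (show d[j]? = some b by rw [← hab]; exact hj), hk⟩
    · -- a ≠ b, a = c  (so b ≠ c)
      have hbc : b ≠ c := fun h => hab (hac.trans h.symm)
      have hca : List.count a [a,b,c] = 2 := by simp [← hac, hab, Ne.symm hab]
      have hcb : 1 ≤ List.count b [a,b,c] := by simp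
      obtain ⟨i, k, hik, hi, hk⟩ := pv_two_le_count.mp (by omega : 2 ≤ List.count a d)
      obtain ⟨j, hj⟩ := pv_one_le_count.mp (by omega : 1 ≤ List.count b d)
      exact ⟨i, j, k, pv_ne_of_get hi hj hab, hik, pv_ne_of_get hj hk (Ne.symm hab),
        hi, hj, (show d[k]? = some c by rw [← hac]; exact hk)⟩
    · by_cases hbc : b = c
      · -- a ≠ b = c
        have hcb : List.count b [a,b,c] = 2 := by simp [← hbc, hab]
        have hca : 1 ≤ List.count a [a,b,c] := by simp [← hbc, Ne.symm hab]
        obtain ⟨j, k, hjk, hj, hk⟩ := pv_two_le_count.mp (by omega : 2 ≤ List.count b d)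
        obtain ⟨i, hi⟩ := pv_one_le_count.mp (by omega : 1 ≤ List.count a d)
        exact ⟨i, j, k, pv_ne_of_get hi hj hab, pv_ne_of_get hi hk hab,
          hjk, hi, hj, (show d[k]? = some c by rw [← hbc]; exact hk)⟩
      · -- all distinct
        have hca : 1 ≤ List.count a [a,b,c] := by simp
        have hcb : 1 ≤ List.count b [a,b,c] := by simp
        have hcc : 1 ≤ List.count c [a,b,c] := by simp
        obtain ⟨i, hi⟩ := pv_one_le_count.mp (by omega : 1 ≤ List.count a d)
        obtain ⟨j, hj⟩ := pv_one_le_count.mp (by omega : 1 ≤ List.count b d)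
        obtain ⟨k, hk⟩ := pv_one_le_count.mp (by omega : 1 ≤ List.count c d)
        exact ⟨i, j, k, pv_ne_of_get hi hj hab, pv_ne_of_get hi hk hac,
          pv_ne_of_get hj hk hbc, hi, hj, hk⟩

theorem pv_A_raw (digits : List Int) (x : Int) :
    x ∈ pvSetA digits ↔ ∃ i ∈ PySem.List.pyRange 0 (digits.length : Int),
      PySem.List.pyGetD digits i 0 ≠ 0 ∧
      ∃ j ∈ PySem.List.pyRange 0 (digits.length : Int), j ≠ i ∧
      ∃ k ∈ PySem.List.pyRange 0 (digits.length : Int),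
        ¬(k = j ∨ k = i ∨ PySem.Int.mod (PySem.List.pyGetD digits k 0) 2 ≠ 0) ∧
        x = PySem.List.pyGetD digits i 0 * 100 + PySem.List.pyGetD digits j 0 * 10 +
            PySem.List.pyGetD digits k 0 := by
  unfold pvSetA
  rw [pv_mem_foldl _ (fun i x => PySem.List.pyGetD digits i 0 ≠ 0 ∧
      ∃ j ∈ PySem.List.pyRange 0 (digits.length : Int), j ≠ i ∧
      ∃ k ∈ PySem.List.pyRange 0 (digits.length : Int),
        ¬(k = j ∨ k = i ∨ PySem.Int.mod (PySem.List.pyGetD digits k 0) 2 ≠ 0) ∧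
        x = PySem.List.pyGetD digits i 0 * 100 + PySem.List.pyGetD digits j 0 * 10 +
            PySem.List.pyGetD digits k 0) ?_]
  · simp [PySem.Set.empty]
  · intro s i x
    split_ifs with h0
    · simp [h0]
    · rw [pv_mem_foldl _ (fun j x => j ≠ i ∧
        ∃ k ∈ PySem.List.pyRange 0 (digits.length : Int),
          ¬(k = j ∨ k = i ∨ PySem.Int.mod (PySem.List.pyGetD digits k 0) 2 ≠ 0) ∧
          x = PySem.List.pyGetD digits i 0 * 100 + PySem.List.pyGetD digits j 0 * 10 +
              PySem.List.pyGetD digits k 0) ?_]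
      · simp [h0]
      · intro s j x
        split_ifs with h1
        · simp [h1]
        · rw [pv_mem_foldl _ (fun k x =>
            ¬(k = j ∨ k = i ∨ PySem.Int.mod (PySem.List.pyGetD digits k 0) 2 ≠ 0) ∧
            x = PySem.List.pyGetD digits i 0 * 100 + PySem.List.pyGetD digits j 0 * 10 +
                PySem.List.pyGetD digits k 0) ?_]
          · simp [h1]
          · intro s k x
            split_ifs with h2
            · exact ⟨Or.inl, fun hx => hx.elim id (fun hp => absurd h2 hp.1)⟩
            · rw [PySem.Set.mem_add]
              exact or_congr Iff.rfl ⟨fun hx => ⟨h2, hx⟩, And.right⟩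

theorem pv_cnt_eq (digits : List Int) : pvCnt digits = PySem.Dict.counter digits :=
  PySem.Dict.foldl_insert_getD_add_one_eq_counter digits

theorem pv_B_raw (digits : List Int) (x : Int) :
    x ∈ pvSetB digits ↔ ∃ a ∈ (pvCnt digits).keys, a ≠ 0 ∧
      ∃ b ∈ (pvCnt digits).keys, ∃ c ∈ (pvCnt digits).keys,
        PySem.Int.mod c 2 = 0 ∧
        ([a, b, c].all fun v => decide ((([a, b, c].count v : Int)) ≤ (pvCnt digits).getD v 0)) = true ∧
        x = a * 100 + b * 10 + c := by
  unfold pvSetB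
  rw [pv_mem_foldl _ (fun a x => a ≠ 0 ∧
      ∃ b ∈ (pvCnt digits).keys, ∃ c ∈ (pvCnt digits).keys,
        PySem.Int.mod c 2 = 0 ∧
        ([a, b, c].all fun v => decide ((([a, b, c].count v : Int)) ≤ (pvCnt digits).getD v 0)) = true ∧
        x = a * 100 + b * 10 + c) ?_]
  · simp [PySem.Set.empty]
  · intro s a x
    split_ifs with h0
    · simp [h0]
    · rw [pv_mem_foldl _ (fun b x =>
        ∃ c ∈ (pvCnt digits).keys,
          PySem.Int.mod c 2 = 0 ∧
          ([a, b, c].all fun v => decide ((([a, b, c].count v : Int)) ≤ (pvCnt digits).getD v 0)) = true ∧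
          x = a * 100 + b * 10 + c) ?_]
      · simp [h0]
      · intro s b x
        rw [pv_mem_foldl _ (fun c x =>
          PySem.Int.mod c 2 = 0 ∧
          ([a, b, c].all fun v => decide ((([a, b, c].count v : Int)) ≤ (pvCnt digits).getD v 0)) = true ∧
          x = a * 100 + b * 10 + c) ?_]
        intro s c x
        split_ifs with h2 h3
        · exact ⟨Or.inl, fun hx => hx.elim id (fun hp => absurd hp.1 h2)⟩
        · rw [PySem.Set.mem_add]
          exact or_congr Iff.rfl ⟨fun hx => ⟨not_ne_iff.mp h2, h3, hx⟩, fun hp => hp.2.2⟩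
        · exact ⟨Or.inl, fun hx => hx.elim id (fun hp => absurd hp.2.1 h3)⟩

theorem pv_A_iff (digits : List Int) (x : Int) :
    x ∈ pvSetA digits ↔ ∃ a b c : Int, PvTriple digits a b c ∧ a ≠ 0 ∧
      PySem.Int.mod c 2 = 0 ∧ x = a * 100 + b * 10 + c := by
  rw [pv_A_raw]
  constructor
  · rintro ⟨i, hiR, hi0, j, hjR, hji, k, hkR, hkc, hx⟩
    rw [PySem.List.mem_pyRange_one] at hiR hjR hkR
    push Not at hkc
    obtain ⟨hkj, hki, hkm⟩ := hkc
    have hiN : i.toNat < digits.length := by omega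
    have hjN : j.toNat < digits.length := by omega
    have hkN : k.toNat < digits.length := by omega
    have egi : PySem.List.pyGetD digits i 0 = digits[i.toNat] := by
      rw [PySem.List.pyGetD_of_nonneg digits 0 hiR.1]
      exact List.getD_eq_getElem ..
    have egj : PySem.List.pyGetD digits j 0 = digits[j.toNat] := by
      rw [PySem.List.pyGetD_of_nonneg digits 0 hjR.1]
      exact List.getD_eq_getElem ..
    have egk : PySem.List.pyGetD digits k 0 = digits[k.toNat] := by
      rw [PySem.List.pyGetD_of_nonneg digits 0 hkR.1]
      exact List.getD_eq_getElem ..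
    refine ⟨digits[i.toNat], digits[j.toNat], digits[k.toNat],
      ⟨i.toNat, j.toNat, k.toNat, by omega, by omega, by omega,
        List.getElem?_eq_getElem hiN, List.getElem?_eq_getElem hjN, List.getElem?_eq_getElem hkN⟩,
      ?_, ?_, ?_⟩
    · rw [← egi]; exact hi0
    · rw [← egk]; exact hkm
    · rw [← egi, ← egj, ← egk]; exact hx
  · rintro ⟨a, b, c, ⟨p, q, r, hpq, hpr, hqr, hp, hq, hr⟩, ha0, hc2, rfl⟩
    obtain ⟨hpL, hpE⟩ := List.getElem?_eq_some_iff.mp hp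
    obtain ⟨hqL, hqE⟩ := List.getElem?_eq_some_iff.mp hq
    obtain ⟨hrL, hrE⟩ := List.getElem?_eq_some_iff.mp hr
    have gp : PySem.List.pyGetD digits (p : Int) 0 = a := by
      rw [PySem.List.pyGetD_natCast, List.getD_eq_getElem]
      · exact hpE
    have gq : PySem.List.pyGetD digits (q : Int) 0 = b := by
      rw [PySem.List.pyGetD_natCast, List.getD_eq_getElem]
      · exact hqE
    have gr : PySem.List.pyGetD digits (r : Int) 0 = c := by
      rw [PySem.List.pyGetD_natCast, List.getD_eq_getElem]
      · exact hrE
    refine ⟨(p : Int), PySem.List.mem_pyRange_one.mpr ⟨by omega, by exact_mod_cast hpL⟩,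
      by rw [gp]; exact ha0,
      (q : Int), PySem.List.mem_pyRange_one.mpr ⟨by omega, by exact_mod_cast hqL⟩,
      by omega,
      (r : Int), PySem.List.mem_pyRange_one.mpr ⟨by omega, by exact_mod_cast hrL⟩,
      ?_, by rw [gp, gq, gr]⟩
    push Not
    exact ⟨by omega, by omega, (by rw [gr]; exact hc2)⟩

theorem pv_B_iff (digits : List Int) (x : Int) :
    x ∈ pvSetB digits ↔ ∃ a b c : Int, a ∈ digits ∧ b ∈ digits ∧ c ∈ digits ∧ a ≠ 0 ∧
      PySem.Int.mod c 2 = 0 ∧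
      (List.count a [a,b,c] ≤ List.count a digits ∧ List.count b [a,b,c] ≤ List.count b digits ∧
       List.count c [a,b,c] ≤ List.count c digits) ∧ x = a * 100 + b * 10 + c := by
  rw [pv_B_raw]
  simp only [pv_cnt_eq, PySem.Dict.keys_counter, PySem.Set.mem_ofList,
    PySem.Dict.getD_counter, List.all_cons, List.all_nil, Bool.and_eq_true,
    decide_eq_true_eq, Nat.cast_le, and_true]
  constructor
  · rintro ⟨a, hma, ha0, b, hmb, c, hmc, hc2, ⟨g1, g2, g3⟩, hx⟩
    exact ⟨a, b, c, hma, hmb, hmc, ha0, hc2, ⟨g1, g2, g3⟩, hx⟩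
  · rintro ⟨a, b, c, hma, hmb, hmc, ha0, hc2, ⟨g1, g2, g3⟩, hx⟩
    exact ⟨a, hma, ha0, b, hmb, c, hmc, hc2, ⟨g1, g2, g3⟩, hx⟩

theorem pv_nodupA (digits : List Int) : List.Nodup (pvSetA digits) := by
  unfold pvSetA
  refine pv_nodup_foldl _ ?_ _ _ List.nodup_nil
  intro s i hs
  split_ifs with h0
  · exact hs
  · refine pv_nodup_foldl _ ?_ _ _ hs
    intro s j hs
    split_ifs with h1
    · exact hs
    · refine pv_nodup_foldl _ ?_ _ _ hs
      intro s k hs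
      split_ifs with h2
      · exact hs
      · exact PySem.Set.nodup_add _ _ hs

theorem pv_nodupB (digits : List Int) : List.Nodup (pvSetB digits) := by
  unfold pvSetB
  refine pv_nodup_foldl _ ?_ _ _ List.nodup_nil
  intro s a hs
  split_ifs with h0
  · exact hs
  · refine pv_nodup_foldl _ ?_ _ _ hs
    intro s b hs
    refine pv_nodup_foldl _ ?_ _ _ hs
    intro s c hs
    split_ifs with h2 h3
    · exact hs
    · exact PySem.Set.nodup_add _ _ hs
    · exact hs

theorem pv_mem_iff (digits : List Int) (x : Int) : x ∈ pvSetA digits ↔ x ∈ pvSetB digits := by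
  rw [pv_A_iff, pv_B_iff]
  constructor
  · rintro ⟨a, b, c, ht, ha0, hc2, rfl⟩
    obtain ⟨hca, hcb, hcc⟩ := (pv_triple_iff digits a b c).mp ht
    have hma : a ∈ digits :=
      List.one_le_count_iff.mp (le_trans (List.one_le_count_iff.mpr (by simp)) hca)
    have hmb : b ∈ digits :=
      List.one_le_count_iff.mp (le_trans (List.one_le_count_iff.mpr (by simp)) hcb)
    have hmc : c ∈ digits :=
      List.one_le_count_iff.mp (le_trans (List.one_le_count_iff.mpr (by simp)) hcc)
    exact ⟨a, b, c, hma, hmb, hmc, ha0, hc2, ⟨hca, hcb, hcc⟩, rfl⟩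
  · rintro ⟨a, b, c, _, _, _, ha0, hc2, hcnt, rfl⟩
    exact ⟨a, b, c, (pv_triple_iff digits a b c).mpr hcnt, ha0, hc2, rfl⟩

-- ===== VERDICT (by name: the statement is the Claim_ definition above) =====
theorem findEvenNumbers_spec : Claim_equal_findEvenNumbers := by
  intro digits _
  unfold Spec_findEvenNumbers findEvenNumbers findEvenNumbers_alt
  rw [PySem.List.sorted_id_eq_sorted_id_iff_perm]
  exact (List.perm_ext_iff_of_nodup (pv_nodupA digits) (pv_nodupB digits)).mpr (pv_mem_iff digits)
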